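-- pv_equiv track=rewrite | github.com/renekerr/python | 100DaysOfCode/Day_8_Functions_with_inputs/additional_exercises/quiz_03_part_02_functions.py | function_check
-- ===== SOURCE A (Python) =====
-- def function_check(x):
--     for m in range(0,3):
--         n = 2
--         while n <= 4:
--             if m == n:
--                 x = x + 1
--             n = n + 1
--     return x
-- ===== SOURCE B (Python) =====
-- def function_check(x):
--     # The nested loops increment x exactly once (only m==n==2 fires), so:
--     return x + 1
-- ===== Notes on version B (the rewrite author's own statement) =====
-- stated objective: simpler
-- what changed: Replaced the nested constant-range loops (which fire exactly once, at m==n==2) with the closed form x + 1.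
import Mathlib
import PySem

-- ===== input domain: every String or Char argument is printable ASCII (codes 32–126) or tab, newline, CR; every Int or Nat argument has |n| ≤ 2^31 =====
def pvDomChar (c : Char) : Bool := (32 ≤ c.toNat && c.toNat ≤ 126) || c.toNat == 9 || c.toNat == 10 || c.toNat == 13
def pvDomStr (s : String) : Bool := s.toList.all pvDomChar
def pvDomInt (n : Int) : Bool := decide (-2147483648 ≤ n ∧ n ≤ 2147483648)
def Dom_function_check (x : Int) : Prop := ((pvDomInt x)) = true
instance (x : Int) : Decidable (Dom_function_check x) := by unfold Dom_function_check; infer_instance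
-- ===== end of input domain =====

-- B replaces A's nested constant loops (which increment x exactly once) by the closed form x + 1 (simpler).

-- ===== PORT A =====
-- inner while loop: 'while n <= 4: if m == n: x += 1; n += 1', with fuel = 4 - n + 1 ≥ decreasing
def function_check_inner (m : Int) : Nat → Int → Int → Int
  | 0, _, x => x
  | fuel + 1, n, x =>
    if n ≤ 4 then
      function_check_inner m fuel (n + 1) (if m = n then x + 1 else x)
    else x

def function_check (x : Int) : Int :=
  (PySem.List.pyRange 0 3 1).foldl (fun x m => function_check_inner m 3 2 x) x

-- ===== PORT B =====
def function_check_alt (x : Int) : Int := x + 1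

-- ===== PRECONDITION & SPEC =====
def Spec_function_check (x : Int) (out : Int) : Prop := out = function_check_alt x
instance (x : Int) (out : Int) : Decidable (Spec_function_check x out) := by unfold Spec_function_check; infer_instance

-- ===== CLAIM (what is proved, stated in full; the proofs are below) =====
def Claim_equal_function_check : Prop := ∀ (x : Int), Dom_function_check x → Spec_function_check x (function_check x)

-- ===== LEMMAS AND PROOFS =====

-- ===== VERDICT (by name: the statement is the Claim_ definition above) =====
theorem function_check_spec : Claim_equal_function_check := by
  intro x _
  unfold Spec_function_check function_check function_check_alt
  simp [PySem.List.pyRange, function_check_inner, List.range_succ]
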